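-- pv_equiv track=rewrite | github.com/ghitafilali/ece6280-crypto | Homework 2/Problem 1/problem1.py | generate_x_stream
-- ===== SOURCE A (Python) =====
-- def x_generator(x_init, x_counter, x_list):
--     """
--         Generate x from the 3 first elements x1, x2, x3.
--     """
--     assert len(x_init) == 3
--
--     while True:
--         if x_counter < len(x_init):
--             x_counter += 1
--             yield x_list[x_counter - 1], x_counter, x_list
--         else:
--             x_list.append((x_list[x_counter - 3] + x_list[x_counter - 2]) % 2)
--             x_counter += 1
--             yield x_list[x_counter - 1], x_counter, x_list
--
-- def generate_x_stream(initial, length):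
--     """
--     Generate x stream of length length from initial state.
--     """
--     stream_list = list()
--     counter = 0
--     elt_list = list(initial)
--     for i in range(length):
--         res, counter, elt_list = x_generator(initial, counter, elt_list).__next__()
--         stream_list.append(res)
--
--     return stream_list
-- ===== SOURCE B (Python) =====
-- def generate_x_stream(initial, length):
--     """Same stream via a direct list-building loop (no generator, no mutation of initial)."""
--     if length <= 0:
--         return []
--     assert len(initial) == 3
--     seq = list(initial)
--     for i in range(3, length):
--         seq.append((seq[i - 3] + seq[i - 2]) % 2)
--     return seq[:length]
-- ===== Notes on version B (the rewrite author's own statement) =====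
-- stated objective: simpler
-- what changed: B replaces the per-iteration re-created stateful generator (yielding value/counter/list triples) with a direct list-building loop over the recurrence plus a final prefix slice, without mutating the caller's list.
import Mathlib
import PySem

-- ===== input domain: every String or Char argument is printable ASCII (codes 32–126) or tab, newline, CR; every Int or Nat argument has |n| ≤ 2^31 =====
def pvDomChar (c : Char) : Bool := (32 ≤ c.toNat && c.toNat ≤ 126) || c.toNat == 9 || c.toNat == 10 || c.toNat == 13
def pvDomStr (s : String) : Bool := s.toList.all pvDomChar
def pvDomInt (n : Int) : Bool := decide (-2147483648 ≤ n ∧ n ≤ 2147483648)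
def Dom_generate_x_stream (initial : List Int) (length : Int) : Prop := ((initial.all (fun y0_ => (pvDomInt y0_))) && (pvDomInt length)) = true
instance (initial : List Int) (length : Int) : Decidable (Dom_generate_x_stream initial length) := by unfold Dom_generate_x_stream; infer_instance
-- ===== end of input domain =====

-- B replaces A's per-iteration re-created generator with a direct list-building loop
-- over the same mod-2 recurrence followed by a prefix slice (objective: simpler).
-- A mutates no caller data here either (it copies initial), so return-value equivalence is full equivalence.

-- ===== PORT A =====
-- one __next__ of x_generator(x_init, x_counter, x_list) (its assert len(x_init)==3 raises outside Pre_)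
def xGenStep (x_init : List Int) (x_counter : Int) (x_list : List Int) : Int × Int × List Int :=
  if x_counter < (x_init.length : Int) then
    (PySem.List.pyGetD x_list ((x_counter + 1) - 1) 0, x_counter + 1, x_list)
  else
    let l := x_list ++ [PySem.Int.mod (PySem.List.pyGetD x_list (x_counter - 3) 0 + PySem.List.pyGetD x_list (x_counter - 2) 0) 2]
    (PySem.List.pyGetD l ((x_counter + 1) - 1) 0, x_counter + 1, l)

def generate_x_stream (initial : List Int) (length : Int) : List Int :=
  let st := (PySem.List.pyRange 0 length 1).foldl
    (fun (st : List Int × Int × List Int) (_i : Int) =>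
      let r := xGenStep initial st.2.1 st.2.2
      (st.1 ++ [r.1], r.2.1, r.2.2))
    (([] : List Int), (0 : Int), initial)
  st.1

-- ===== PORT B =====
def generate_x_stream_alt (initial : List Int) (length : Int) : List Int :=
  if length ≤ 0 then []
  else
    let seq := (PySem.List.pyRange 3 length 1).foldl
      (fun (seq : List Int) (i : Int) =>
        seq ++ [PySem.Int.mod (PySem.List.pyGetD seq (i - 3) 0 + PySem.List.pyGetD seq (i - 2) 0) 2])
      initial
    PySem.List.slice seq none (some length)

-- ===== PRECONDITION & SPEC =====
-- Pre_ excludes exactly the inputs where A's generator assert fires (length >= 1 with len(initial) != 3):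
-- there A raises AssertionError (and B's own assert raises too).
def Pre_generate_x_stream (initial : List Int) (length : Int) : Prop :=
  length ≤ 0 ∨ initial.length = 3
instance (initial : List Int) (length : Int) : Decidable (Pre_generate_x_stream initial length) := by
  unfold Pre_generate_x_stream; infer_instance
def pvWitness_generate_x_stream : List Int × Int := ([1, 0, 0], 7)

def Spec_generate_x_stream (initial : List Int) (length : Int) (out : List Int) : Prop := out = generate_x_stream_alt initial length
instance (initial : List Int) (length : Int) (out : List Int) : Decidable (Spec_generate_x_stream initial length out) := by unfold Spec_generate_x_stream; infer_instance

-- ===== CLAIM (what is proved, stated in full; the proofs are below) =====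
def Claim_equal_generate_x_stream : Prop := ∀ (initial : List Int) (length : Int), Dom_generate_x_stream initial length → Pre_generate_x_stream initial length → Spec_generate_x_stream initial length (generate_x_stream initial length)

-- ===== LEMMAS AND PROOFS =====

-- the elt_list after k generator steps (proof-side characterisation of both loops)
def eltSeq (initial : List Int) : Nat → List Int
  | 0 => initial
  | k + 1 =>
    if k < 3 then eltSeq initial k
    else eltSeq initial k ++
      [PySem.Int.mod (PySem.List.pyGetD (eltSeq initial k) ((k : Int) - 3) 0 +
                      PySem.List.pyGetD (eltSeq initial k) ((k : Int) - 2) 0) 2]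

theorem eltSeq_length (initial : List Int) (h3 : initial.length = 3) (k : Nat) :
    (eltSeq initial k).length = max 3 k := by
  induction k with
  | zero => simp [eltSeq, h3]
  | succ k ih =>
    by_cases hk : k < 3
    · simp [eltSeq, hk, ih]; omega
    · simp [eltSeq, hk, ih]; omega

theorem A_fold (initial : List Int) (h3 : initial.length = 3) (n : Nat) :
    (PySem.List.pyRange 0 (n : Int) 1).foldl
      (fun (st : List Int × Int × List Int) (_i : Int) =>
        let r := xGenStep initial st.2.1 st.2.2
        (st.1 ++ [r.1], r.2.1, r.2.2))
      (([] : List Int), (0 : Int), initial)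
    = ((eltSeq initial n).take n, (n : Int), eltSeq initial n) := by
  induction n with
  | zero => simp [eltSeq, PySem.List.pyRange]
  | succ n ih =>
    rw [show (((n + 1 : Nat)) : Int) = (n : Int) + 1 from by push_cast; ring,
        PySem.List.pyRange_one_succ_right (by omega), List.foldl_append, ih]
    simp only [List.foldl_cons, List.foldl_nil]
    by_cases hn : n < 3
    · have hE : eltSeq initial (n + 1) = eltSeq initial n := by simp [eltSeq, hn]
      have hEn : eltSeq initial n = initial := by
        clear hE; interval_cases n <;> simp [eltSeq]
      simp only [xGenStep, hE, hEn, h3]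
      rw [if_pos (by exact_mod_cast hn)]
      have : ((n : Int) + 1 - 1) = ((n : Nat) : Int) := by ring
      rw [this, PySem.List.pyGetD_natCast]
      have hlt : n < initial.length := by omega
      rw [List.take_add_one, List.getElem?_eq_getElem hlt, List.getD_eq_getElem initial 0 hlt]
      simp
    · have hE : eltSeq initial (n + 1) = eltSeq initial n ++
        [PySem.Int.mod (PySem.List.pyGetD (eltSeq initial n) ((n : Int) - 3) 0 +
                        PySem.List.pyGetD (eltSeq initial n) ((n : Int) - 2) 0) 2] := by
        simp [eltSeq, hn]
      have hlen : (eltSeq initial n).length = n := by rw [eltSeq_length initial h3]; omega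
      simp only [xGenStep, h3]
      rw [if_neg (by push_cast; omega)]
      simp only [← hE]
      have : ((n : Int) + 1 - 1) = ((n : Nat) : Int) := by ring
      rw [this, PySem.List.pyGetD_natCast]
      have hlen' : (eltSeq initial (n + 1)).length = n + 1 := by
        rw [eltSeq_length initial h3]; omega
      have hlt : n < (eltSeq initial (n + 1)).length := by omega
      have htake : (eltSeq initial (n + 1)).take n = (eltSeq initial n).take n := by
        rw [hE, List.take_append_of_le_length (by omega)]
      rw [List.take_add_one, List.getElem?_eq_getElem hlt,
          List.getD_eq_getElem _ 0 hlt, htake]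
      simp

theorem B_fold (initial : List Int) (m : Nat) (hm : 3 ≤ m) :
    (PySem.List.pyRange 3 (m : Int) 1).foldl
      (fun (seq : List Int) (i : Int) =>
        seq ++ [PySem.Int.mod (PySem.List.pyGetD seq (i - 3) 0 + PySem.List.pyGetD seq (i - 2) 0) 2])
      initial
    = eltSeq initial m := by
  induction m with
  | zero => omega
  | succ m ih =>
    by_cases h3 : m < 3
    · have : m = 2 := by omega
      subst this
      have hE : eltSeq initial 3 = initial := by simp [eltSeq]
      rw [hE]
      norm_num [PySem.List.pyRange]
    · rw [show (((m + 1 : Nat)) : Int) = (m : Int) + 1 from by push_cast; ring,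
          PySem.List.pyRange_one_succ_right (by omega), List.foldl_append, ih (by omega)]
      simp [eltSeq, h3]

theorem eltSeq_small (initial : List Int) (n : Nat) (h : n ≤ 3) : eltSeq initial n = initial := by
  interval_cases n <;> simp [eltSeq]

-- ===== VERDICT (by name: the statement is the Claim_ definition above) =====
theorem generate_x_stream_spec : Claim_equal_generate_x_stream := by
  intro initial length _hdom hpre
  unfold Spec_generate_x_stream generate_x_stream generate_x_stream_alt
  by_cases hle : length ≤ 0
  · have : PySem.List.pyRange 0 length 1 = [] := by
      simp [PySem.List.pyRange]; omega
    simp [this, hle]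
  · have h3 : initial.length = 3 := by
      rcases hpre with h | h
      · omega
      · exact h
    have hn : length = ((length.toNat : Nat) : Int) := by omega
    rw [if_neg hle, hn, A_fold initial h3]
    dsimp only
    rw [PySem.List.slice_to _ (by positivity : (0:Int) ≤ ((length.toNat : Nat) : Int))]
    by_cases hm : 3 ≤ length.toNat
    · rw [B_fold initial length.toNat hm]
      simp
      omega
    · have : PySem.List.pyRange 3 ((length.toNat : Nat) : Int) 1 = [] := by
        simp [PySem.List.pyRange]; omega
      rw [this]
      simp [eltSeq_small initial length.toNat (by omega)]
      omega
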